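-- pv_equiv track=rewrite | github.com/ag502/algorithm | Problem/Prgrms_뉴스 클러스터링/main.py | make_string_set
-- ===== SOURCE A (Python) =====
-- def make_string_set(string):
--     string_set = {}
--     for ch1, ch2 in zip(string, string[1:]):
--         ch1 = ch1.lower()
--         ch2 = ch2.lower()
--         if ch1 != '' and ch2 != '' and 'a' <= ch1 <= 'z' and 'a' <= ch2 <= 'z':
--             if ch1 + ch2 in string_set:
--                 string_set[ch1 + ch2] += 1
--             else:
--                 string_set[ch1 + ch2] = 1
--     return string_set
-- ===== SOURCE B (Python) =====
-- def make_string_set(string):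
--     # Two-phase: split the string into maximal runs of lowered alphabetic
--     # characters, then count adjacent pairs inside each run.
--     runs = []
--     cur = []
--     for ch in string:
--         lo = ch.lower()
--         if 'a' <= lo <= 'z':
--             cur.append(lo)
--         else:
--             if cur:
--                 runs.append(cur)
--             cur = []
--     if cur:
--         runs.append(cur)
--     counts = {}
--     for run in runs:
--         for a, b in zip(run, run[1:]):
--             key = a + b
--             counts[key] = counts.get(key, 0) + 1
--     return counts
-- ===== Notes on version B (the rewrite author's own statement) =====
-- stated objective: alternative
-- what changed: B replaces A's single guarded pass over all adjacent character pairs by a two-phase decomposition: it first splits the string into maximal runs of lowered alphabetic characters, then counts the adjacent pairs inside each run with dict.get-based updates.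
import Mathlib
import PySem

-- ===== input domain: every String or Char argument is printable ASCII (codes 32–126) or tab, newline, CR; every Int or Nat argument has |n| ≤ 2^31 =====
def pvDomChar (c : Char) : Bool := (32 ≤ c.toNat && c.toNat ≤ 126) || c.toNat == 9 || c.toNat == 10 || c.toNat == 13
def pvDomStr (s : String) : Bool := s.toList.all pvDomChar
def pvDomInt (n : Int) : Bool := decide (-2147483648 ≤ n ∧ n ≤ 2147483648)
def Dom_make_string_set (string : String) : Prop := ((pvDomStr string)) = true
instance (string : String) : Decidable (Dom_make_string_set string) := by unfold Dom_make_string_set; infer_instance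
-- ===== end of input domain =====

-- B counts the same alphabetic bigrams by a two-phase run decomposition (split into maximal
-- runs of lowered letters, then count adjacent pairs per run) instead of A's single guarded
-- pass over all adjacent pairs; objective: alternative decomposition (no speed claim).

-- ===== PORT A =====
-- loop body of A: lower both chars, and if both are in 'a'..'z', bump the bigram's count
-- (Python's `ch1 != '' and ch2 != ''` test is always true for a character and has no port).
def pvBodyA (d : PySem.Dict String Int) (p : Char × Char) : PySem.Dict String Int :=
  let ch1 := PySem.Chars.lowerChar p.1
  let ch2 := PySem.Chars.lowerChar p.2
  if ('a' ≤ ch1 ∧ ch1 ≤ 'z') ∧ ('a' ≤ ch2 ∧ ch2 ≤ 'z') then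
    if d.contains (String.mk [ch1, ch2]) then
      d.modify (String.mk [ch1, ch2]) 0 (· + 1)
    else
      d.insert (String.mk [ch1, ch2]) 1
  else d

def make_string_set (string : String) : List (String × Int) :=
  ((string.toList.zip (PySem.List.slice string.toList (some 1) none)).foldl
      pvBodyA PySem.Dict.empty).items

-- ===== PORT B =====
-- `if cur: runs.append(cur)` of Source B
def pvFinal (st : List (List Char) × List Char) : List (List Char) :=
  if st.2 = [] then st.1 else st.1 ++ [st.2]

-- one step of Source B's first loop: extend the current run, or close it
def pvRunStep (st : List (List Char) × List Char) (ch : Char) : List (List Char) × List Char :=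
  let lo := PySem.Chars.lowerChar ch
  if 'a' ≤ lo ∧ lo ≤ 'z' then (st.1, st.2 ++ [lo])
  else (pvFinal st, [])

-- body of Source B's counting loop: counts[key] = counts.get(key, 0) + 1
def pvBodyB (d : PySem.Dict String Int) (p : Char × Char) : PySem.Dict String Int :=
  d.insert (String.mk [p.1, p.2]) (d.getD (String.mk [p.1, p.2]) 0 + 1)

def make_string_set_alt (string : String) : List (String × Int) :=
  ((pvFinal (string.toList.foldl pvRunStep ([], []))).foldl
      (fun d run => (run.zip (PySem.List.slice run (some 1) none)).foldl pvBodyB d)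
      PySem.Dict.empty).items

-- ===== PRECONDITION & SPEC =====
def Spec_make_string_set (string : String) (out : List (String × Int)) : Prop := out = make_string_set_alt string
instance (string : String) (out : List (String × Int)) : Decidable (Spec_make_string_set string out) := by unfold Spec_make_string_set; infer_instance

-- ===== CLAIM (what is proved, stated in full; the proofs are below) =====
def Claim_equal_make_string_set : Prop := ∀ (string : String), Dom_make_string_set string → Spec_make_string_set string (make_string_set string)

-- ===== LEMMAS AND PROOFS =====

def pvLo (c : Char) : Char := PySem.Chars.lowerChar c
def pvValid (c : Char) : Bool := decide ('a' ≤ pvLo c) && decide (pvLo c ≤ 'z')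

def pvBump (d : PySem.Dict String Int) (k : String) : PySem.Dict String Int := d.modify k 0 (· + 1)

-- the bigram keys A emits, in emission order
def pvKeysA : List Char → List String
  | c1 :: c2 :: t =>
      (if pvValid c1 && pvValid c2 then [String.mk [pvLo c1, pvLo c2]] else []) ++ pvKeysA (c2 :: t)
  | _ => []

-- the bigram keys of one (already lowered) run
def pvRunKeys : List Char → List String
  | a :: b :: t => String.mk [a, b] :: pvRunKeys (b :: t)
  | _ => []

-- keys B will emit given the pending run `cur` and the rest of the input
def pvKeysFrom : List Char → List Char → List String
  | cur, [] => pvRunKeys cur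
  | cur, c :: t =>
      if pvValid c then pvKeysFrom (cur ++ [pvLo c]) t else pvRunKeys cur ++ pvKeysFrom [] t

-- keys emitted after a pending run ending in (lowered) `a`
def pvKeysLast (a : Char) : List Char → List String
  | [] => []
  | c :: t => if pvValid c then String.mk [a, pvLo c] :: pvKeysLast (pvLo c) t else pvKeysFrom [] t

@[simp] lemma pvKeysA_nil : pvKeysA [] = [] := rfl
@[simp] lemma pvKeysA_single (c : Char) : pvKeysA [c] = [] := rfl
lemma pvKeysA_cons₂ (c1 c2 : Char) (t : List Char) :
    pvKeysA (c1 :: c2 :: t)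
      = (if pvValid c1 && pvValid c2 then [String.mk [pvLo c1, pvLo c2]] else []) ++ pvKeysA (c2 :: t) := rfl
@[simp] lemma pvRunKeys_nil : pvRunKeys [] = [] := rfl
@[simp] lemma pvRunKeys_single (a : Char) : pvRunKeys [a] = [] := rfl
lemma pvRunKeys_cons₂ (a b : Char) (t : List Char) :
    pvRunKeys (a :: b :: t) = String.mk [a, b] :: pvRunKeys (b :: t) := rfl
@[simp] lemma pvKeysFrom_nil (cur : List Char) : pvKeysFrom cur [] = pvRunKeys cur := rfl
lemma pvKeysFrom_cons (cur : List Char) (c : Char) (t : List Char) :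
    pvKeysFrom cur (c :: t)
      = if pvValid c then pvKeysFrom (cur ++ [pvLo c]) t else pvRunKeys cur ++ pvKeysFrom [] t := rfl
@[simp] lemma pvKeysLast_nil (a : Char) : pvKeysLast a [] = [] := rfl
lemma pvKeysLast_cons (a c : Char) (t : List Char) :
    pvKeysLast a (c :: t)
      = if pvValid c then String.mk [a, pvLo c] :: pvKeysLast (pvLo c) t else pvKeysFrom [] t := rfl

lemma pvValid_iff (c : Char) : pvValid c = true ↔ ('a' ≤ pvLo c ∧ pvLo c ≤ 'z') := by
  simp [pvValid]

lemma pvRunKeys_append (r : List Char) (a b : Char) :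
    pvRunKeys (r ++ [a, b]) = pvRunKeys (r ++ [a]) ++ [String.mk [a, b]] := by
  induction r with
  | nil => rfl
  | cons x r ih =>
    cases r with
    | nil => rfl
    | cons y r' =>
      simp only [List.cons_append, pvRunKeys_cons₂] at ih ⊢
      rw [ih]

lemma pvKeysFrom_append (l : List Char) : ∀ (r : List Char) (a : Char),
    pvKeysFrom (r ++ [a]) l = pvRunKeys (r ++ [a]) ++ pvKeysLast a l := by
  induction l with
  | nil => intro r a; simp
  | cons c t ih =>
    intro r a
    rw [pvKeysFrom_cons, pvKeysLast_cons]
    by_cases h : pvValid c = true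
    · rw [if_pos h, if_pos h]
      have h1 : (r ++ [a]) ++ [pvLo c] = r ++ [a, pvLo c] := by simp
      have h2 := ih (r ++ [a]) (pvLo c)
      rw [h1] at h2
      rw [h1, h2, pvRunKeys_append]
      simp
    · rw [if_neg h, if_neg h]

lemma pvKeysA_cons_invalid (c : Char) (t : List Char) (h : pvValid c = false) :
    pvKeysA (c :: t) = pvKeysA t := by
  cases t with
  | nil => rfl
  | cons c2 t' => rw [pvKeysA_cons₂, h]; simp

lemma pvKeys_main (l : List Char) :
    pvKeysFrom [] l = pvKeysA l ∧
      ∀ c, pvValid c = true → pvKeysLast (pvLo c) l = pvKeysA (c :: l) := by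
  induction l with
  | nil => exact ⟨rfl, fun c hc => rfl⟩
  | cons c t ih =>
    refine ⟨?_, ?_⟩
    · rw [pvKeysFrom_cons]
      by_cases h : pvValid c = true
      · rw [if_pos h]
        have h2 := pvKeysFrom_append t [] (pvLo c)
        simp only [List.nil_append] at h2
        rw [List.nil_append, h2, pvRunKeys_single, List.nil_append, ih.2 c h]
      · have hf : pvValid c = false := by
          cases hv : pvValid c with
          | false => rfl
          | true => exact absurd hv h
        rw [if_neg h, pvRunKeys_nil, List.nil_append, ih.1, pvKeysA_cons_invalid c t hf]
    · intro c' hc'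
      rw [pvKeysLast_cons, pvKeysA_cons₂]
      by_cases h : pvValid c = true
      · rw [if_pos h, hc', h, ih.2 c h]
        simp
      · have hf : pvValid c = false := by
          cases hv : pvValid c with
          | false => rfl
          | true => exact absurd hv h
        rw [if_neg h, ih.1, hc']
        simp only [Bool.true_and]
        rw [hf]
        simp [pvKeysA_cons_invalid c t hf]

-- both programs' dict updates are the same "bump"
lemma pvBodyA_eq (d : PySem.Dict String Int) (p : Char × Char) :
    pvBodyA d p = if pvValid p.1 && pvValid p.2 then pvBump d (String.mk [pvLo p.1, pvLo p.2]) else d := by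
  show (if ('a' ≤ pvLo p.1 ∧ pvLo p.1 ≤ 'z') ∧ ('a' ≤ pvLo p.2 ∧ pvLo p.2 ≤ 'z') then
          if d.contains (String.mk [pvLo p.1, pvLo p.2]) then
            d.modify (String.mk [pvLo p.1, pvLo p.2]) 0 (· + 1)
          else d.insert (String.mk [pvLo p.1, pvLo p.2]) 1
        else d) = _
  by_cases h : ('a' ≤ pvLo p.1 ∧ pvLo p.1 ≤ 'z') ∧ ('a' ≤ pvLo p.2 ∧ pvLo p.2 ≤ 'z')
  · rw [if_pos h]
    have hb : (pvValid p.1 && pvValid p.2) = true := by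
      simp only [Bool.and_eq_true, pvValid_iff]; exact h
    rw [hb, if_pos rfl]
    by_cases hc : PySem.Dict.contains d (String.mk [pvLo p.1, pvLo p.2]) = true
    · rw [if_pos hc]; rfl
    · rw [if_neg hc, pvBump, PySem.Dict.modify]
      have hf : d.contains (String.mk [pvLo p.1, pvLo p.2]) = false := by
        cases hv : d.contains (String.mk [pvLo p.1, pvLo p.2]) with
        | false => rfl
        | true => exact absurd hv hc
      have h0 := PySem.Dict.getD_of_not_contains d 0 hf
      rw [h0]
      norm_num
  · rw [if_neg h]
    have hb : (pvValid p.1 && pvValid p.2) = false := by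
      rw [← Bool.not_eq_true, Bool.and_eq_true, pvValid_iff, pvValid_iff]
      exact fun hh => h ⟨hh.1, hh.2⟩
    rw [hb]; simp

lemma pvBodyB_eq (d : PySem.Dict String Int) (p : Char × Char) :
    pvBodyB d p = pvBump d (String.mk [p.1, p.2]) := rfl

lemma pvFoldA (l : List Char) : ∀ d,
    (l.zip l.tail).foldl pvBodyA d = (pvKeysA l).foldl pvBump d := by
  induction l with
  | nil => intro d; rfl
  | cons c1 rest ih =>
    cases rest with
    | nil => intro d; rfl
    | cons c2 t =>
      intro d
      have hz : (c1 :: c2 :: t).zip (c1 :: c2 :: t).tail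
          = (c1, c2) :: ((c2 :: t).zip (c2 :: t).tail) := rfl
      rw [hz, List.foldl_cons, ih, pvKeysA_cons₂, List.foldl_append, pvBodyA_eq]
      by_cases h : (pvValid c1 && pvValid c2) = true
      · rw [h]; simp
      · have h' : (pvValid c1 && pvValid c2) = false := by
          revert h; cases (pvValid c1 && pvValid c2) <;> simp
        rw [h']; simp

lemma pvFoldRun (r : List Char) : ∀ d,
    (r.zip r.tail).foldl pvBodyB d = (pvRunKeys r).foldl pvBump d := by
  induction r with
  | nil => intro d; rfl
  | cons a rest ih =>
    cases rest with
    | nil => intro d; rfl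
    | cons b t =>
      intro d
      have hz : (a :: b :: t).zip (a :: b :: t).tail
          = (a, b) :: ((b :: t).zip (b :: t).tail) := rfl
      rw [hz, List.foldl_cons, ih, pvRunKeys_cons₂, List.foldl_cons, pvBodyB_eq]

lemma pvFoldRuns (runs : List (List Char)) : ∀ d,
    runs.foldl (fun d run => (run.zip run.tail).foldl pvBodyB d) d
      = ((runs.map pvRunKeys).flatten).foldl pvBump d := by
  induction runs with
  | nil => intro d; rfl
  | cons r rs ih =>
    intro d
    rw [List.foldl_cons, List.map_cons, List.flatten_cons, List.foldl_append, ih, pvFoldRun]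

lemma pvRuns_keys (l : List Char) : ∀ (rs : List (List Char)) (cur : List Char),
    ((pvFinal (l.foldl pvRunStep (rs, cur))).map pvRunKeys).flatten
      = (rs.map pvRunKeys).flatten ++ pvKeysFrom cur l := by
  induction l with
  | nil =>
    intro rs cur
    cases cur with
    | nil => simp [pvFinal]
    | cons x c' => simp [pvFinal]
  | cons c t ih =>
    intro rs cur
    rw [List.foldl_cons, pvKeysFrom_cons]
    by_cases h : pvValid c = true
    · have hc : 'a' ≤ pvLo c ∧ pvLo c ≤ 'z' := (pvValid_iff c).mp h
      have hstep : pvRunStep (rs, cur) c = (rs, cur ++ [pvLo c]) := by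
        simp only [pvRunStep, pvLo] at hc ⊢
        rw [if_pos hc]
      rw [hstep, ih, if_pos h]
    · have hc : ¬ ('a' ≤ pvLo c ∧ pvLo c ≤ 'z') := fun hh => h ((pvValid_iff c).mpr hh)
      have hstep : pvRunStep (rs, cur) c = (pvFinal (rs, cur), []) := by
        simp only [pvRunStep, pvLo] at hc ⊢
        rw [if_neg hc]
      rw [hstep, ih, if_neg h]
      cases cur with
      | nil => simp [pvFinal]
      | cons x c' => simp [pvFinal]

-- ===== VERDICT (by name: the statement is the Claim_ definition above) =====
theorem make_string_set_spec : Claim_equal_make_string_set := by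
  intro s _
  show make_string_set s = make_string_set_alt s
  unfold make_string_set make_string_set_alt
  simp only [PySem.List.slice_from_one]
  rw [pvFoldA, pvFoldRuns]
  have h1 := pvRuns_keys s.toList [] []
  simp only [List.map_nil, List.flatten_nil, List.nil_append] at h1
  rw [h1, (pvKeys_main s.toList).1]
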